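-- pv_equiv track=rewrite | github.com/rampedro/Cracking-the-coding-interview-leetcode | mul-book.py | minProHelp
-- ===== SOURCE A (Python) =====
-- def minProHelp(small,big):
--     if small == 0: return 0
--     elif small == 1 : return big
--
--     s = small >> 1
--     halfProd = minProHelp(s,big)
--
--     if small % 2 == 0:
--         return halfProd + halfProd
--     else:
--         return halfProd + halfProd + big
-- ===== SOURCE B (Python) =====
-- def minProHelp(small, big):
--     # Russian-peasant multiplication: flat loop instead of tree recursion.
--     result = 0
--     while small > 1:
--         if small % 2 == 1:
--             result += big
--         big += big
--         small >>= 1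
--     if small == 1:
--         result += big
--     return result
-- ===== Notes on version B (the rewrite author's own statement) =====
-- stated objective: alternative
-- what changed: Replaces the halving tree recursion with an iterative Russian-peasant loop that accumulates doubled partial products in a flat while loop.
import Mathlib
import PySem

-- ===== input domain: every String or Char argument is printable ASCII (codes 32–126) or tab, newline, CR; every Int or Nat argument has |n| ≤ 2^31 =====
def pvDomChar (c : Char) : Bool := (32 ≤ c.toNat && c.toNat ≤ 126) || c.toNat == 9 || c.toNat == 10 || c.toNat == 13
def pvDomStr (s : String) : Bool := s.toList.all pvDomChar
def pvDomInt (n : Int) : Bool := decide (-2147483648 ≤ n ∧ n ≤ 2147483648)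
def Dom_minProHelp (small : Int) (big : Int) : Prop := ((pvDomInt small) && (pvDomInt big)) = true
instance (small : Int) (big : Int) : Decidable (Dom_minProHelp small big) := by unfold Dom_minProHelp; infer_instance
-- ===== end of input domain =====

-- B replaces A's halving tree recursion with an iterative Russian-peasant loop (same cost, flat loop, O(1) stack).


-- ===== PORT A =====
-- Literal port of A's recursion.  For small < 0 the Python recursion never
-- terminates (small >> 1 is eventually stuck at -1, RecursionError); that
-- region is outside Pre_, and the port carries a totality guard returning 0
-- there (guard only makes the recursion total, it changes no claimed input).
def minProHelp (small : Int) (big : Int) : Int :=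
  if small = 0 then 0
  else if small = 1 then big
  else if small < 0 then 0   -- totality guard: Python diverges here (outside Pre_)
  else
    let s := PySem.Int.floordiv small 2        -- small >> 1
    let halfProd := minProHelp s big
    if PySem.Int.mod small 2 = 0 then halfProd + halfProd
    else halfProd + halfProd + big
termination_by small.toNat
decreasing_by
  have h2 : (2:Int) ≤ small := by omega
  have := PySem.Int.floordiv_eq_ediv_of_pos (a := small) (b := 2) (by omega)
  simp only [this]
  omega

-- ===== PORT B =====
-- while small > 1: [if small % 2 == 1: result += big]; big += big; small >>= 1
-- returns the final (small, big, result) state.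
def minProHelpLoop (small : Int) (big : Int) (result : Int) : Int × Int × Int :=
  if small > 1 then
    let result' := if PySem.Int.mod small 2 = 1 then result + big else result
    minProHelpLoop (PySem.Int.floordiv small 2) (big + big) result'
  else (small, big, result)
termination_by small.toNat
decreasing_by
  have := PySem.Int.floordiv_eq_ediv_of_pos (a := small) (b := 2) (by omega)
  simp only [this]
  omega

def minProHelp_alt (small : Int) (big : Int) : Int :=
  let st := minProHelpLoop small big 0
  if st.1 = 1 then st.2.2 + st.2.1 else st.2.2

-- ===== PRECONDITION & SPEC =====
-- Pre_ excludes small < 0, on which the Python A never returns (RecursionError).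
def Pre_minProHelp (small : Int) (big : Int) : Prop := 0 ≤ small
instance (small : Int) (big : Int) : Decidable (Pre_minProHelp small big) := by unfold Pre_minProHelp; infer_instance
def pvWitness_minProHelp : Int × Int := (6, -7)

def Spec_minProHelp (small : Int) (big : Int) (out : Int) : Prop := out = minProHelp_alt small big
instance (small : Int) (big : Int) (out : Int) : Decidable (Spec_minProHelp small big out) := by unfold Spec_minProHelp; infer_instance

-- ===== CLAIM (what is proved, stated in full; the proofs are below) =====
def Claim_equal_minProHelp : Prop := ∀ (small : Int) (big : Int), Dom_minProHelp small big → Pre_minProHelp small big → Spec_minProHelp small big (minProHelp small big)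

-- ===== LEMMAS AND PROOFS =====

theorem minProHelp_eq_mul (small big : Int) (h : 0 ≤ small) :
    minProHelp small big = small * big := by
  fun_induction minProHelp small big with
  | case1 => simp
  | case2 => ring
  | case3 _ h0 h1 hneg => omega
  | case4 small h0 h1 hneg s halfProd heven ih =>
    have h2 : (2:Int) ≤ small := by omega
    have hfd : PySem.Int.floordiv small 2 = small / 2 :=
      PySem.Int.floordiv_eq_ediv_of_pos (by omega)
    have hmd : PySem.Int.mod small 2 = small % 2 :=
      PySem.Int.mod_eq_emod_of_pos (by omega)
    simp only [s, halfProd, hfd] at ih ⊢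
    rw [ih (by omega)]
    have he : (2:Int) * (small / 2) = small := by
      simp only [hmd] at heven; omega
    linear_combination big * he
  | case5 small h0 h1 hneg s halfProd hodd ih =>
    have h2 : (2:Int) ≤ small := by omega
    have hfd : PySem.Int.floordiv small 2 = small / 2 :=
      PySem.Int.floordiv_eq_ediv_of_pos (by omega)
    have hmd : PySem.Int.mod small 2 = small % 2 :=
      PySem.Int.mod_eq_emod_of_pos (by omega)
    simp only [s, halfProd, hfd] at ih ⊢
    rw [ih (by omega)]
    have ho : (2:Int) * (small / 2) = small - 1 := by
      simp only [hmd] at hodd; omega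
    linear_combination big * ho

theorem minProHelpLoop_spec (small big result : Int) (h : 1 ≤ small) :
    (minProHelpLoop small big result).1 = 1 ∧
    (minProHelpLoop small big result).2.2 + (minProHelpLoop small big result).2.1
      = result + small * big := by
  fun_induction minProHelpLoop small big result with
  | case1 small big result hgt result' ih =>
    have hfd : PySem.Int.floordiv small 2 = small / 2 :=
      PySem.Int.floordiv_eq_ediv_of_pos (by omega)
    have hmd : PySem.Int.mod small 2 = small % 2 :=
      PySem.Int.mod_eq_emod_of_pos (by omega)
    have hs : 1 ≤ small / 2 := by omega
    obtain ⟨h1, h2⟩ := ih (by simpa [hfd] using hs)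
    refine ⟨h1, ?_⟩
    rw [h2]
    simp only [result', hfd, hmd]
    have hq : small / 2 * (big + big) = 2 * (small / 2) * big := by ring
    rw [hq, show (2 * (small / 2) : Int) = small - small % 2 from by omega]
    split_ifs with hpar
    · rw [hpar]; ring
    · rw [show small % 2 = 0 from by omega]; ring
  | case2 small big result hle =>
    have : small = 1 := by omega
    simp [this]

theorem minProHelp_alt_eq_mul (small big : Int) (h : 0 ≤ small) :
    minProHelp_alt small big = small * big := by
  unfold minProHelp_alt
  rcases lt_or_ge small 1 with h1 | h1
  · have h0 : small = 0 := by omega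
    subst h0
    rw [minProHelpLoop]
    norm_num
  · obtain ⟨hs, hr⟩ := minProHelpLoop_spec small big 0 h1
    simp [hs]
    omega

-- ===== VERDICT =====
theorem minProHelp_spec : Claim_equal_minProHelp := by
  intro small big _ hpre
  unfold Spec_minProHelp
  rw [minProHelp_eq_mul small big hpre, minProHelp_alt_eq_mul small big hpre]
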